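-- pv_equiv track=rewrite | github.com/201803854/algorithm | 과일장수.py | solution
-- ===== SOURCE A (Python) =====
-- def solution(k, m, score):
--     answer = 0
--     box_num = m
--     score.sort(reverse=True)
--     count = 0
--     for i in score :
--
--         temp = []
--         temp.append(i)
--         count+=1
--
--         if count == m :
--             answer += min(temp)*m
--             count = 0
--
--     return answer
-- ===== SOURCE B (Python) =====
-- def solution(k, m, score):
--     # Note: like A, this sorts `score` in place (descending); equivalence is about the return value.
--     score.sort(reverse=True)
--     if m <= 0:
--         return 0
--     answer = 0
--     rest = score
--     while len(rest) >= m: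
--         answer += min(rest[:m]) * m
--         rest = rest[m:]
--     return answer
-- ===== Notes on version B (the rewrite author's own statement) =====
-- stated objective: simpler
-- what changed: Replaces A's per-element loop with a reset counter (and a singleton temp list whose min is taken) by chunking the descending-sorted list into complete groups of m and summing min(group)*m per group.
import Mathlib
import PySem

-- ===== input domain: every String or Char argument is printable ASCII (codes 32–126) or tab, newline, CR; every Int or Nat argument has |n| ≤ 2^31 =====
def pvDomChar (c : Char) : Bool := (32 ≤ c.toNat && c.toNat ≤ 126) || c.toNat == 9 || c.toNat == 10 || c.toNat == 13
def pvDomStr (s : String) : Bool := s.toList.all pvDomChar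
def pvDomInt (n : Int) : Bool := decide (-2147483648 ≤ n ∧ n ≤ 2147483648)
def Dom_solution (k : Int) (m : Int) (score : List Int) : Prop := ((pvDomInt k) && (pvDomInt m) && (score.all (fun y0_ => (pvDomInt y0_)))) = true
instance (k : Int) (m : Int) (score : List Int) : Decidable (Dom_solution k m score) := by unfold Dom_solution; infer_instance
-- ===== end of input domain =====

-- B replaces A's per-element reset-counter loop by chunking the descending-sorted list into
-- complete groups of m, adding min(group)*m per group (objective: simpler).
-- Both A and B sort `score` in place (descending); the equivalence proved is about the return value.

-- ===== PORT A =====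
def solution (k : Int) (m : Int) (score : List Int) : Int :=
  -- answer = 0; box_num = m (unused); score.sort(reverse=True); count = 0; for i in score: ...
  let scoreSorted := PySem.List.sorted score (fun x => x) true
  (scoreSorted.foldl (fun (st : Int × Int) i =>
      let temp : List Int := [] ++ [i]          -- temp = []; temp.append(i)
      let count := st.2 + 1                      -- count += 1
      if count == m then
        (st.1 + ((PySem.List.min? temp (fun x => x)).getD 0) * m, 0)   -- answer += min(temp)*m; count = 0
      else (st.1, count)) ((0 : Int), (0 : Int))).1

-- ===== PORT B =====
-- while len(rest) >= m: answer += min(rest[:m]) * m; rest = rest[m:]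
-- (0 < m is part of the guard only to justify termination; B reaches this loop only when 0 < m)
def chunkLoop (m : Int) (rest : List Int) : Int :=
  if h : 0 < m ∧ m ≤ (rest.length : Int) then
    ((PySem.List.min? (PySem.List.slice rest none (some m)) (fun x => x)).getD 0) * m
      + chunkLoop m (PySem.List.slice rest (some m) none)
  else 0
termination_by rest.length
decreasing_by
  simp only [PySem.List.slice_from rest h.1.le, List.length_drop]
  omega

def solution_alt (k : Int) (m : Int) (score : List Int) : Int :=
  let scoreSorted := PySem.List.sorted score (fun x => x) true
  if m ≤ 0 then 0 else chunkLoop m scoreSorted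

-- ===== PRECONDITION & SPEC =====
def Spec_solution (k : Int) (m : Int) (score : List Int) (out : Int) : Prop := out = solution_alt k m score
instance (k : Int) (m : Int) (score : List Int) (out : Int) : Decidable (Spec_solution k m score out) := by unfold Spec_solution; infer_instance

-- ===== CLAIM (what is proved, stated in full; the proofs are below) =====
def Claim_equal_solution : Prop := ∀ (k : Int) (m : Int) (score : List Int), Dom_solution k m score → Spec_solution k m score (solution k m score)

-- ===== LEMMAS AND PROOFS =====

-- A's loop body as a named function (definitionally the lambda in `solution`)
def stepA (m : Int) (st : Int × Int) (i : Int) : Int × Int :=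
  let temp : List Int := [] ++ [i]
  let count := st.2 + 1
  if count == m then
    (st.1 + ((PySem.List.min? temp (fun x => x)).getD 0) * m, 0)
  else (st.1, count)

-- the sum A's loop still adds, when r more elements must pass before the next reset
def gB (m : Int) : Nat → List Int → Int
  | _, [] => 0
  | r, i :: t => if r = 1 then i * m + gB m m.toNat t else gB m (r - 1) t

lemma stepA_reset (m : Int) (ans c i : Int) (h : c + 1 = m) :
    stepA m (ans, c) i = (ans + i * m, 0) := by
  simp [stepA, h, PySem.List.min?_id_cons]

lemma stepA_incr (m : Int) (ans c i : Int) (h : c + 1 ≠ m) :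
    stepA m (ans, c) i = (ans, c + 1) := by
  simp [stepA, h]

lemma foldA_nonpos (m : Int) (hm : m ≤ 0) :
    ∀ (s : List Int) (ans c : Int), 0 ≤ c →
    (s.foldl (stepA m) (ans, c)).1 = ans := by
  intro s
  induction s with
  | nil => intro ans c _; rfl
  | cons i t ih =>
      intro ans c hc
      rw [List.foldl_cons, stepA_incr m ans c i (by omega)]
      exact ih ans (c + 1) (by omega)

lemma foldA_eq (m : Int) :
    ∀ (s : List Int) (ans c : Int), 0 ≤ c → c < m →
    (s.foldl (stepA m) (ans, c)).1 = ans + gB m (m - c).toNat s := by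
  intro s
  induction s with
  | nil => intro ans c _ _; simp [gB]
  | cons i t ih =>
      intro ans c hc hcm
      by_cases h : c + 1 = m
      · rw [List.foldl_cons, stepA_reset m ans c i h,
          ih (ans + i * m) 0 le_rfl (by omega)]
        have h1 : (m - c).toNat = 1 := by omega
        simp only [gB, h1, if_pos, Int.sub_zero]
        ring
      · rw [List.foldl_cons, stepA_incr m ans c i h,
          ih ans (c + 1) (by omega) (by omega)]
        have h1 : (m - c).toNat ≠ 1 := by omega
        have h2 : (m - c).toNat - 1 = (m - (c + 1)).toNat := by omega
        simp only [gB, h1, h2, if_false]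

lemma gB_zero (m : Int) : ∀ (r : Nat) (t : List Int), t.length < r → gB m r t = 0 := by
  intro r
  induction r with
  | zero => intro t h; omega
  | succ n ih =>
      intro t h
      cases t with
      | nil => rfl
      | cons i t' =>
          simp only [List.length_cons] at h
          have hr : n + 1 ≠ 1 := by omega
          simp only [gB, hr, if_false]
          exact ih t' (by omega)

lemma gB_split (m : Int) : ∀ (r : Nat) (s : List Int), 0 < r → r ≤ s.length →
    gB m r s = s.getD (r - 1) 0 * m + gB m m.toNat (s.drop r) := by
  intro r
  induction r with
  | zero => intro s h; omega
  | succ n ih =>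
      intro s _ hlen
      cases s with
      | nil => simp at hlen
      | cons i t =>
          by_cases hn : n = 0
          · subst hn
            simp [gB]
          · have hr : n + 1 ≠ 1 := by omega
            simp only [gB, hr, if_false, Nat.add_sub_cancel]
            rw [ih t (by omega) (by simpa using hlen)]
            have hg : (i :: t).getD n 0 = t.getD (n - 1) 0 := by
              have hn' : n = (n - 1) + 1 := by omega
              rw [hn']
              rfl
            rw [hg]
            rfl

lemma min_take (s : List Int) (hp : s.Pairwise (fun a b => b ≤ a)) (n : Nat)
    (hn : 0 < n) (hlen : n ≤ s.length) :
    (PySem.List.min? (s.take n) (fun x => x)).getD 0 = s.getD (n - 1) 0 := by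
  have hblen : (s.take n).length = n := by simp [Nat.min_eq_left hlen]
  have hbne : s.take n ≠ [] := by
    intro h; rw [h] at hblen; simp at hblen; omega
  obtain ⟨v, hv⟩ : ∃ v, PySem.List.min? (s.take n) (fun x => x) = some v := by
    cases hmm : PySem.List.min? (s.take n) (fun x => x) with
    | none => exact absurd ((PySem.List.min?_eq_none_iff _ _).mp hmm) hbne
    | some v => exact ⟨v, rfl⟩
  have hmem := PySem.List.min?_mem hv
  have hmin := PySem.List.min?_isMin hv
  have hpb : (s.take n).Pairwise (fun a b => b ≤ a) := hp.sublist (List.take_sublist n s)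
  have hpb' := List.pairwise_iff_getElem.mp hpb
  have hlast : (s.take n)[n - 1]'(by omega) = s.getD (n - 1) 0 := by
    have h1 : n - 1 < s.length := by omega
    rw [List.getElem_take, List.getD_eq_getElem s 0 h1]
  have h1 : v ≤ s.getD (n - 1) 0 := by
    rw [← hlast]
    exact hmin _ (List.getElem_mem _)
  obtain ⟨j, hj, hjv⟩ := List.mem_iff_getElem.mp hmem
  have h2 : s.getD (n - 1) 0 ≤ v := by
    rw [← hlast, ← hjv]
    rcases Nat.lt_or_ge j (n - 1) with hlt | hge
    · exact hpb' j (n - 1) (by omega) (by omega) hlt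
    · have hje : j = n - 1 := by omega
      subst hje; exact le_rfl
  rw [hv]
  exact le_antisymm h1 h2

lemma gB_chunk (m : Int) (hm : 0 < m) :
    ∀ (n : Nat) (s : List Int), s.length ≤ n → s.Pairwise (fun a b => b ≤ a) →
    gB m m.toNat s = chunkLoop m s := by
  intro n
  induction n with
  | zero =>
      intro s hlen _
      have hs : s = [] := List.eq_nil_of_length_eq_zero (by omega)
      subst hs
      rw [chunkLoop.eq_def]
      simp [gB, hm]
  | succ n ih =>
      intro s hlen hp
      by_cases hms : m ≤ (s.length : Int)
      · rw [chunkLoop.eq_def, dif_pos ⟨hm, hms⟩]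
        rw [PySem.List.slice_to s hm.le, PySem.List.slice_from s hm.le]
        have hmt : 0 < m.toNat := by omega
        have hmts : m.toNat ≤ s.length := by omega
        rw [gB_split m m.toNat s hmt hmts]
        rw [min_take s hp m.toNat hmt hmts]
        rw [ih (s.drop m.toNat) (by simp; omega) (hp.sublist (List.drop_sublist m.toNat s))]
      · have h0 : gB m m.toNat s = 0 := gB_zero m m.toNat s (by omega)
        rw [chunkLoop.eq_def, dif_neg (by intro h; exact hms h.2), h0]

-- ===== VERDICT (by name: the statement is the Claim_ definition above) =====
theorem solution_spec : Claim_equal_solution := by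
  intro k m score _
  unfold Spec_solution
  show (List.foldl (stepA m) (0, 0) (PySem.List.sorted score (fun x => x) true)).1
      = solution_alt k m score
  unfold solution_alt
  set s := PySem.List.sorted score (fun x => x) true with hs
  by_cases hm : m ≤ 0
  · rw [if_pos hm]
    exact foldA_nonpos m hm s 0 0 le_rfl
  · rw [if_neg hm]
    have hm' : 0 < m := by omega
    rw [foldA_eq m s 0 0 le_rfl hm']
    have hp : s.Pairwise (fun a b => b ≤ a) := by
      have := PySem.List.sorted_pairwise_rev score (fun x => x)
      simpa using this
    rw [Int.sub_zero, gB_chunk m hm' s.length s le_rfl hp, Int.zero_add]
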